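-- pv_equiv track=rewrite | github.com/garethellis0/Advent-Of-Code | day_3/day_3.py | houses_visited
-- ===== SOURCE A (Python) =====
-- def houses_visited(directions):
--     # Gets the all houses visited from a given set of directions (ignoring repeated houses)
--     xcoor = 0  # Present x-coordinate
--     ycoor = 0  # Present y-coordinate
--     visited = []  # List of all coordinates visited [x,y]
--
--     for direction in directions:
--         if direction == 'v':
--             ycoor -= 1
--         elif direction == '^':
--             ycoor += 1
--         elif direction == '>':
--             xcoor += 1
--         elif direction == '<':
--             xcoor -= 1
--
--         new_coordinates = [xcoor, ycoor]
--
--         if new_coordinates not in visited: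
--             visited.append(new_coordinates)
--
--     return visited
-- ===== SOURCE B (Python) =====
-- DELTAS = {'v': (0, -1), '^': (0, 1), '>': (1, 0), '<': (-1, 0)}
--
--
-- def houses_visited(directions):
--     # Stage 1: materialise the whole path of positions, one tuple per step.
--     path = [(0, 0)]
--     for c in directions:
--         dx, dy = DELTAS.get(c, (0, 0))
--         x, y = path[-1]
--         path.append((x + dx, y + dy))
--     path = path[1:]
--     # Stage 2: "nub by filter": emit the earliest remaining position, then
--     # delete all of its occurrences; repeat. No visited structure, no
--     # membership test — first-appearance order falls out of the filtering.
--     out = []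
--     while path:
--         p = path[0]
--         out.append([p[0], p[1]])
--         path = [q for q in path if q != p]
--     return out
-- ===== Notes on version B (the rewrite author's own statement) =====
-- stated objective: alternative
-- what changed: B first materialises the whole coordinate path as tuples (positions appended from path[-1] plus a dict-looked-up delta), then deduplicates it with a filter-based nub (repeatedly emit the first remaining position and delete all its occurrences) instead of A's interleaved move-and-scan-the-visited-list loop with membership tests.
import Mathlib
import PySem

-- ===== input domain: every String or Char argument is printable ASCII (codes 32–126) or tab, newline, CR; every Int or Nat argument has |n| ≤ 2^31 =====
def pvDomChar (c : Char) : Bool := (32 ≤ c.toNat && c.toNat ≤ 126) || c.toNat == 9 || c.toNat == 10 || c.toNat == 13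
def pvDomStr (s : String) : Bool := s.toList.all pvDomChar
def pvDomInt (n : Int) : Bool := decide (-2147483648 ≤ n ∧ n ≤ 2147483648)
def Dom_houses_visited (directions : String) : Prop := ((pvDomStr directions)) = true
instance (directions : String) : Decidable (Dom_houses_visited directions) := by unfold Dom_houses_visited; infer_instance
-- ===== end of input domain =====

-- B materialises the full path first and then strips duplicates with a
-- filter-based nub (no visited structure); A interleaves the move with a
-- membership scan of the visited list. Alternative decomposition, same cost.

-- ===== PORT A =====
def houses_visited (directions : String) : List (List Int) :=
  (directions.toList.foldl
    (fun (st : Int × Int × List (List Int)) direction =>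
      let xcoor := st.1
      let ycoor := st.2.1
      let visited := st.2.2
      let (xcoor, ycoor) :=
        if direction = 'v' then (xcoor, ycoor - 1)
        else if direction = '^' then (xcoor, ycoor + 1)
        else if direction = '>' then (xcoor + 1, ycoor)
        else if direction = '<' then (xcoor - 1, ycoor)
        else (xcoor, ycoor)
      let new_coordinates := [xcoor, ycoor]
      (xcoor, ycoor,
        if new_coordinates ∈ visited then visited else visited ++ [new_coordinates]))
    (0, 0, [])).2.2

-- ===== PORT B =====
def pvDELTAS : PySem.Dict Char (Int × Int) :=
  PySem.Dict.ofList [('v', (0, -1)), ('^', (0, 1)), ('>', (1, 0)), ('<', (-1, 0))]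

-- one step of B's loop body: DELTAS.get(c,(0,0)) added to path[-1]
def pvStepC (p : Int × Int) (c : Char) : Int × Int :=
  let d := PySem.Dict.getD pvDELTAS c (0, 0)
  (p.1 + d.1, p.2 + d.2)

-- B's while loop: emit path[0], delete all its occurrences, repeat
def pvNub : List (Int × Int) → List (List Int)
  | [] => []
  | p :: rest => [p.1, p.2] :: pvNub (rest.filter (fun q => q ≠ p))
termination_by l => l.length
decreasing_by
  simp only [List.length_cons, List.length_unattach]
  exact Nat.lt_succ_of_le ((List.length_filter_le _ _).trans (by simp))

def houses_visited_alt (directions : String) : List (List Int) :=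
  -- path[-1] on the always-nonempty path list is exactly getLastD here
  let path := directions.toList.foldl
    (fun path c => path ++ [pvStepC (path.getLastD (0, 0)) c]) [((0 : Int), (0 : Int))]
  let path := path.drop 1
  pvNub path

-- ===== PRECONDITION & SPEC =====
def Spec_houses_visited (directions : String) (out : List (List Int)) : Prop := out = houses_visited_alt directions
instance (directions : String) (out : List (List Int)) : Decidable (Spec_houses_visited directions out) := by unfold Spec_houses_visited; infer_instance

-- ===== CLAIM (what is proved, stated in full; the proofs are below) =====
def Claim_equal_houses_visited : Prop := ∀ (directions : String), Dom_houses_visited directions → Spec_houses_visited directions (houses_visited directions)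

-- ===== LEMMAS AND PROOFS =====

-- abstract path of positions visited after each step
def pvPath (p : Int × Int) : List Char → List (Int × Int)
  | [] => []
  | c :: cs => pvStepC p c :: pvPath (pvStepC p c) cs

-- A's single move equals B's delta step
theorem pv_step_eq (p : Int × Int) (c : Char) :
    (if c = 'v' then (p.1, p.2 - 1)
     else if c = '^' then (p.1, p.2 + 1)
     else if c = '>' then (p.1 + 1, p.2)
     else if c = '<' then (p.1 - 1, p.2)
     else p) = pvStepC p c := by
  have hv : pvDELTAS.getD 'v' (0, 0) = (0, -1) := by decide
  have hu : pvDELTAS.getD '^' (0, 0) = (0, 1) := by decide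
  have hr : pvDELTAS.getD '>' (0, 0) = (1, 0) := by decide
  have hl : pvDELTAS.getD '<' (0, 0) = (-1, 0) := by decide
  by_cases h1 : c = 'v'
  · subst h1; simp [hv, pvStepC, Int.sub_eq_add_neg]
  by_cases h2 : c = '^'
  · subst h2; simp [h1, hu, pvStepC]
  by_cases h3 : c = '>'
  · subst h3; simp [h1, h2, hr, pvStepC]
  by_cases h4 : c = '<'
  · subst h4; simp [h1, h2, h3, hl, pvStepC, Int.sub_eq_add_neg]
  have hitems : pvDELTAS.items = [('v', (0, -1)), ('^', (0, 1)), ('>', (1, 0)), ('<', (-1, 0))] := by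
    decide
  have b1 : ('v' == c) = false := beq_eq_false_iff_ne.mpr (fun h => h1 h.symm)
  have b2 : ('^' == c) = false := beq_eq_false_iff_ne.mpr (fun h => h2 h.symm)
  have b3 : ('>' == c) = false := beq_eq_false_iff_ne.mpr (fun h => h3 h.symm)
  have b4 : ('<' == c) = false := beq_eq_false_iff_ne.mpr (fun h => h4 h.symm)
  have hget : pvDELTAS.getD c (0, 0) = (0, 0) := by
    simp [PySem.Dict.getD, PySem.Dict.get?, hitems, List.find?, b1, b2, b3, b4]
  simp [h1, h2, h3, h4, hget, pvStepC]

-- A's loop: the visited accumulator is the list-membership dedup fold over the mapped path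
theorem pv_main (cs : List Char) (p : Int × Int) (vis : List (List Int)) :
    (cs.foldl
      (fun (st : Int × Int × List (List Int)) direction =>
        let xcoor := st.1
        let ycoor := st.2.1
        let visited := st.2.2
        let (xcoor, ycoor) :=
          if direction = 'v' then (xcoor, ycoor - 1)
          else if direction = '^' then (xcoor, ycoor + 1)
          else if direction = '>' then (xcoor + 1, ycoor)
          else if direction = '<' then (xcoor - 1, ycoor)
          else (xcoor, ycoor)
        let new_coordinates := [xcoor, ycoor]
        (xcoor, ycoor,
          if new_coordinates ∈ visited then visited else visited ++ [new_coordinates]))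
      (p.1, p.2, vis)).2.2
    = ((pvPath p cs).map (fun p => [p.1, p.2])).foldl
        (fun acc t => if t ∈ acc then acc else acc ++ [t]) vis := by
  induction cs generalizing p vis with
  | nil => simp [pvPath]
  | cons c cs ih =>
      have hs := pv_step_eq p c
      set q := pvStepC p c with hq
      simp only [pvPath, List.map_cons, List.foldl_cons]
      have := ih q (if [q.1, q.2] ∈ vis then vis else vis ++ [[q.1, q.2]])
      rw [← this]
      congr 1
      simp only [hs, hq]

-- the foldl dedup with accumulator equals acc ++ filter-based nub of the unseen part
theorem pv_fold_eq_nub (l : List (Int × Int)) (acc : List (Int × Int)) :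
    (l.map (fun p => [p.1, p.2])).foldl
        (fun acc t => if t ∈ acc then acc else acc ++ [t])
        (acc.map (fun p => [p.1, p.2]))
    = acc.map (fun p => [p.1, p.2]) ++ pvNub (l.filter (fun q => q ∉ acc)) := by
  induction l generalizing acc with
  | nil => simp [pvNub]
  | cons p rest ih =>
      have hmem : ([p.1, p.2] ∈ acc.map (fun q : Int × Int => [q.1, q.2])) ↔ p ∈ acc := by
        constructor
        · rintro h
          rcases List.mem_map.1 h with ⟨q, hq, he⟩
          have : q = p := by
            have h1 : q.1 = p.1 := by simpa using congrArg (fun l => l.headI) he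
            have h2 : q.2 = p.2 := by simpa using congrArg (fun l => l.tail.headI) he
            exact Prod.ext h1 h2
          simpa [this] using hq
        · intro h; exact List.mem_map.2 ⟨p, h, rfl⟩
      by_cases hp : p ∈ acc
      · have := ih acc
        simp only [List.map_cons, List.foldl_cons, hmem.2 hp, if_pos, List.filter_cons] at *
        simpa [hp] using this
      · have hfilter : rest.filter (fun q => decide (q ∉ acc ++ [p]))
            = (rest.filter (fun q => decide (q ∉ acc))).filter (fun q => decide (q ≠ p)) := by
          rw [List.filter_filter]
          apply List.filter_congr
          intro x _
          by_cases hx1 : x ∈ acc <;> by_cases hx2 : x = p <;> simp [hx1, hx2]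
        have := ih (acc ++ [p])
        have hnp : ¬ ([p.1, p.2] ∈ acc.map (fun q : Int × Int => [q.1, q.2])) :=
          fun h => hp (hmem.1 h)
        simp only [List.map_cons, List.foldl_cons, hnp, if_neg, not_false_iff,
          List.filter_cons] at *
        rw [show (acc.map (fun q : Int × Int => [q.1, q.2]) ++ [[p.1, p.2]])
              = ((acc ++ [p]).map (fun q : Int × Int => [q.1, q.2])) by simp] at *
        rw [this]
        simp only [hfilter]
        simp [hp, pvNub]
  
-- B's path-building loop computes pvPath
theorem pv_build (cs : List Char) (acc : List (Int × Int)) (p : Int × Int) :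
    cs.foldl (fun path c => path ++ [pvStepC (path.getLastD (0, 0)) c]) (acc ++ [p])
      = (acc ++ [p]) ++ pvPath p cs := by
  induction cs generalizing acc p with
  | nil => simp [pvPath]
  | cons c cs ih =>
      have hlast : (acc ++ [p]).getLastD (0, 0) = p := by
        simp [List.getLastD_eq_getLast?]
      simp only [List.foldl_cons, hlast]
      have := ih (acc ++ [p]) (pvStepC p c)
      simp only [List.append_assoc] at this ⊢
      rw [this]
      simp [pvPath]

theorem houses_visited_eq (directions : String) :
    houses_visited directions = houses_visited_alt directions := by
  unfold houses_visited houses_visited_alt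
  rw [pv_main directions.toList (0, 0) []]
  have hb := pv_build directions.toList [] ((0 : Int), (0 : Int))
  simp only [List.nil_append] at hb
  rw [hb]
  have := pv_fold_eq_nub (pvPath (0, 0) directions.toList) []
  simp only [List.map_nil, List.nil_append] at this
  rw [this]
  simp

-- ===== VERDICT (by name: the statement is the Claim_ definition above) =====
theorem houses_visited_spec : Claim_equal_houses_visited := by
  intro directions _
  exact houses_visited_eq directions
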